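-- pv_equiv track=rewrite | github.com/diaz-zeng/miniprogram-minium-mcp | src/minium_mcp/adapters/minium/runtime.py | _to_xpath_literal
-- ===== SOURCE A (Python) =====
-- def _to_xpath_literal(value: str) -> str:
--     if '"' not in value:
--         return f'"{value}"'
--     if "'" not in value:
--         return f"'{value}'"
--     parts = value.split('"')
--     segments: list[str] = []
--     for index, part in enumerate(parts):
--         if part:
--             segments.append(f'"{part}"')
--         if index != len(parts) - 1:
--             segments.append("'\"'")
--     return f"concat({', '.join(segments)})"
-- ===== SOURCE B (Python) =====
-- def _to_xpath_literal(value: str) -> str: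
--     if '"' not in value:
--         return f'"{value}"'
--     if "'" not in value:
--         return f"'{value}'"
--     segments: list[str] = []
--     buf = ''
--     for ch in value:
--         if ch == '"':
--             if buf:
--                 segments.append(f'"{buf}"')
--                 buf = ''
--             segments.append('\'"\'')
--         else:
--             buf += ch
--     if buf:
--         segments.append(f'"{buf}"')
--     return f"concat({', '.join(segments)})"
-- ===== Notes on version B (the rewrite author's own statement) =====
-- stated objective: alternative
-- what changed: The mixed-quote case is rebuilt by a single character-by-character scan maintaining a buffer of the current non-double-quote run (flushed as a wrapped segment at each double quote and at the end), instead of A's split on the double-quote character followed by an enumerate loop over the parts.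
import Mathlib
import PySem

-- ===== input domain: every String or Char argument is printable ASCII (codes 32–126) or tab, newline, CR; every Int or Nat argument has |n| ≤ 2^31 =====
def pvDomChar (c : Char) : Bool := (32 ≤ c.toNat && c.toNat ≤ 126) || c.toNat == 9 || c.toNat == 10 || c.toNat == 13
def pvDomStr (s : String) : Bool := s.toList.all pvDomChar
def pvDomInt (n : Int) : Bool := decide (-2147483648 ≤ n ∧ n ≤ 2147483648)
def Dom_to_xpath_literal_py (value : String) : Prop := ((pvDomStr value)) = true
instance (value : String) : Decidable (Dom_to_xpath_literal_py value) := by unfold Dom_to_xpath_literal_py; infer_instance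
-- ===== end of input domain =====

-- B replaces A's split-then-enumerate segment construction by a single character scan
-- with a buffer of the current non-quote run (objective: alternative single-pass decomposition).

-- ===== PORT A =====
-- A's mixed-case branch: split on the double-quote character, then enumerate the parts,
-- wrapping nonempty parts and emitting the quote segment between consecutive parts.
def to_xpath_literal_py (value : String) : String :=
  if PySem.Str.isIn "\"" value = false then
    String.ofList ('"' :: value.toList ++ ['"'])
  else if PySem.Str.isIn "'" value = false then
    String.ofList ('\'' :: value.toList ++ ['\''])
  else
    let parts := PySem.Chars.splitOn value.toList ['"']
    let segments := (PySem.List.enumerate parts 0).foldl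
      (fun segs ip =>
        let segs1 := if ip.2 ≠ [] then segs ++ ['"' :: ip.2 ++ ['"']] else segs
        if ip.1 ≠ (parts.length : Int) - 1 then segs1 ++ [['\'', '"', '\'']] else segs1) []
    String.ofList ("concat(".toList ++ PySem.Chars.join ", ".toList segments ++ [')'])

-- ===== PORT B =====
-- B's mixed-case branch: one pass over the characters keeping (segments, buffer); a double
-- quote flushes the nonempty buffer as a wrapped segment and emits the quote segment; a final flush.
def to_xpath_literal_py_alt (value : String) : String :=
  if PySem.Str.isIn "\"" value = false then
    String.ofList ('"' :: value.toList ++ ['"'])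
  else if PySem.Str.isIn "'" value = false then
    String.ofList ('\'' :: value.toList ++ ['\''])
  else
    let st := value.toList.foldl
      (fun (st : List (List Char) × List Char) c =>
        if c = '"' then
          ((if st.2 ≠ [] then st.1 ++ ['"' :: st.2 ++ ['"']] else st.1) ++ [['\'', '"', '\'']], [])
        else (st.1, st.2 ++ [c])) ([], [])
    let segments := if st.2 ≠ [] then st.1 ++ ['"' :: st.2 ++ ['"']] else st.1
    String.ofList ("concat(".toList ++ PySem.Chars.join ", ".toList segments ++ [')'])

-- ===== PRECONDITION & SPEC =====
def Spec_to_xpath_literal_py (value : String) (out : String) : Prop := out = to_xpath_literal_py_alt value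
instance (value : String) (out : String) : Decidable (Spec_to_xpath_literal_py value out) := by unfold Spec_to_xpath_literal_py; infer_instance

-- ===== CLAIM (what is proved, stated in full; the proofs are below) =====
def Claim_equal_to_xpath_literal_py : Prop := ∀ (value : String), Dom_to_xpath_literal_py value → Spec_to_xpath_literal_py value (to_xpath_literal_py value)

-- ===== LEMMAS AND PROOFS =====

/-- Structural split at the double-quote character. -/
def qSplit : List Char → List (List Char)
  | [] => [[]]
  | c :: cs => if c = '"' then [] :: qSplit cs else (qSplit cs).modifyHead (c :: ·)

theorem qSplit_ne_nil (cs : List Char) : qSplit cs ≠ [] := by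
  induction cs with
  | nil => simp [qSplit]
  | cons c cs ih =>
    simp only [qSplit]
    split
    · simp
    · cases h : qSplit cs with
      | nil => exact absurd h ih
      | cons q qs => simp [List.modifyHead]

theorem modifyHead_nil_append (l : List (List Char)) :
    l.modifyHead (fun x => [] ++ x) = l := by
  cases l <;> simp [List.modifyHead]

theorem modifyHead_id (l : List (List Char)) :
    l.modifyHead (fun x => x) = l := by
  cases l <;> simp [List.modifyHead]

theorem go_single (fuel : Nat) (l cur : List Char) (accs : List (List Char))
    (h : l.length ≤ fuel) :
    PySem.Chars.splitOn.go ['"'] fuel l cur accs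
      = accs.reverse ++ (qSplit l).modifyHead (cur.reverse ++ ·) := by
  induction fuel generalizing l cur accs with
  | zero =>
    have : l = [] := by cases l <;> simp_all
    subst this
    simp [PySem.Chars.splitOn.go, qSplit]
  | succ fuel ih =>
    cases l with
    | nil => simp [PySem.Chars.splitOn.go, qSplit]
    | cons c rest =>
      simp only [PySem.Chars.splitOn.go]
      by_cases hc : c = '"'
      · subst hc
        rw [if_pos (by simp [List.isPrefixOf])]
        rw [ih _ _ _ (by simpa using Nat.le_of_succ_le_succ h)]
        simp [qSplit, modifyHead_id]
      · rw [if_neg (by simp [List.isPrefixOf]; exact fun hh => hc hh.symm)]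
        rw [ih _ _ _ (by simpa using Nat.le_of_succ_le_succ h)]
        cases hq : qSplit rest with
        | nil => exact absurd hq (qSplit_ne_nil rest)
        | cons q qs => simp [qSplit, hc, hq, List.modifyHead]

theorem splitOn_quote (cs : List Char) :
    PySem.Chars.splitOn cs ['"'] = qSplit cs := by
  rw [PySem.Chars.splitOn, go_single (cs.length + 1) cs [] [] (by omega)]
  cases hq : qSplit cs with
  | nil => exact absurd hq (qSplit_ne_nil cs)
  | cons q qs => simp [List.modifyHead]

/-- The segment list both loops build, as structural recursion on the parts. -/
def segsOf : List (List Char) → List (List Char)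
  | [] => []
  | [p] => if p ≠ [] then ['"' :: p ++ ['"']] else []
  | p :: q :: ps =>
      (if p ≠ [] then ['"' :: p ++ ['"']] else []) ++ [['\'', '"', '\'']] ++ segsOf (q :: ps)

/-- A's enumerate loop computes `segsOf` of the parts. -/
theorem foldA (n : Int) (parts : List (List Char)) : ∀ (s : Int) (acc : List (List Char)),
    s + parts.length = n →
    (PySem.List.enumerate parts s).foldl
      (fun segs ip =>
        let segs1 := if ip.2 ≠ [] then segs ++ ['"' :: ip.2 ++ ['"']] else segs
        if ip.1 ≠ n - 1 then segs1 ++ [['\'', '"', '\'']] else segs1) acc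
      = acc ++ segsOf parts := by
  induction parts with
  | nil => intro s acc _; simp [PySem.List.enumerate_nil, segsOf]
  | cons p ps ih =>
    intro s acc h
    cases ps with
    | nil =>
      have hs : s = n - 1 := by simp at h; omega
      subst hs
      rw [PySem.List.enumerate_cons, PySem.List.enumerate_nil, List.foldl_cons, List.foldl_nil]
      by_cases hp : p = [] <;> simp [segsOf, hp]
    | cons q qs =>
      have hs : s ≠ n - 1 := by simp at h; omega
      rw [PySem.List.enumerate_cons, List.foldl_cons,
        ih (s + 1) _ (by simp at h ⊢; omega)]
      by_cases hp : p = [] <;> simp [segsOf, hp, hs]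

/-- B's scan with pending buffer computes `segsOf` of the split with the buffer
    prepended to the first part. -/
theorem scanB : ∀ (cs : List Char) (segs : List (List Char)) (buf : List Char),
    (if (cs.foldl
        (fun (st : List (List Char) × List Char) c =>
          if c = '"' then
            ((if st.2 ≠ [] then st.1 ++ ['"' :: st.2 ++ ['"']] else st.1) ++ [['\'', '"', '\'']], [])
          else (st.1, st.2 ++ [c])) (segs, buf)).2 ≠ []
      then (cs.foldl
        (fun (st : List (List Char) × List Char) c =>
          if c = '"' then
            ((if st.2 ≠ [] then st.1 ++ ['"' :: st.2 ++ ['"']] else st.1) ++ [['\'', '"', '\'']], [])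
          else (st.1, st.2 ++ [c])) (segs, buf)).1 ++
          ['"' :: (cs.foldl
        (fun (st : List (List Char) × List Char) c =>
          if c = '"' then
            ((if st.2 ≠ [] then st.1 ++ ['"' :: st.2 ++ ['"']] else st.1) ++ [['\'', '"', '\'']], [])
          else (st.1, st.2 ++ [c])) (segs, buf)).2 ++ ['"']]
      else (cs.foldl
        (fun (st : List (List Char) × List Char) c =>
          if c = '"' then
            ((if st.2 ≠ [] then st.1 ++ ['"' :: st.2 ++ ['"']] else st.1) ++ [['\'', '"', '\'']], [])
          else (st.1, st.2 ++ [c])) (segs, buf)).1)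
      = segs ++ segsOf ((qSplit cs).modifyHead (buf ++ ·)) := by
  intro cs
  induction cs with
  | nil =>
    intro segs buf
    simp only [List.foldl_nil, qSplit, List.modifyHead]
    by_cases hb : buf = [] <;> simp [segsOf, hb]
  | cons c cs ih =>
    intro segs buf
    simp only [List.foldl_cons]
    by_cases hc : c = '"'
    · subst hc
      rw [if_pos rfl, ih]
      cases hq : qSplit cs with
      | nil => exact absurd hq (qSplit_ne_nil cs)
      | cons q qs =>
        by_cases hb : buf = [] <;>
          simp [qSplit, hq, segsOf, hb, List.modifyHead]
    · rw [if_neg hc, ih]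
      cases hq : qSplit cs with
      | nil => exact absurd hq (qSplit_ne_nil cs)
      | cons q qs => simp [qSplit, hc, hq, List.modifyHead]

/-- The mixed-case segment lists of the two ports agree. -/
theorem segments_eq (cs : List Char) :
    (PySem.List.enumerate (PySem.Chars.splitOn cs ['"']) 0).foldl
      (fun segs ip =>
        let segs1 := if ip.2 ≠ [] then segs ++ ['"' :: ip.2 ++ ['"']] else segs
        if ip.1 ≠ ((PySem.Chars.splitOn cs ['"']).length : Int) - 1
          then segs1 ++ [['\'', '"', '\'']] else segs1) []
    = (if (cs.foldl
          (fun (st : List (List Char) × List Char) c =>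
            if c = '"' then
              ((if st.2 ≠ [] then st.1 ++ ['"' :: st.2 ++ ['"']] else st.1) ++ [['\'', '"', '\'']], [])
            else (st.1, st.2 ++ [c])) ([], [])).2 ≠ []
        then (cs.foldl
          (fun (st : List (List Char) × List Char) c =>
            if c = '"' then
              ((if st.2 ≠ [] then st.1 ++ ['"' :: st.2 ++ ['"']] else st.1) ++ [['\'', '"', '\'']], [])
            else (st.1, st.2 ++ [c])) ([], [])).1 ++
            ['"' :: (cs.foldl
          (fun (st : List (List Char) × List Char) c =>
            if c = '"' then
              ((if st.2 ≠ [] then st.1 ++ ['"' :: st.2 ++ ['"']] else st.1) ++ [['\'', '"', '\'']], [])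
            else (st.1, st.2 ++ [c])) ([], [])).2 ++ ['"']]
        else (cs.foldl
          (fun (st : List (List Char) × List Char) c =>
            if c = '"' then
              ((if st.2 ≠ [] then st.1 ++ ['"' :: st.2 ++ ['"']] else st.1) ++ [['\'', '"', '\'']], [])
            else (st.1, st.2 ++ [c])) ([], [])).1) := by
  rw [splitOn_quote, foldA ((qSplit cs).length : Int) (qSplit cs) 0 [] (by simp),
    scanB cs [] [], modifyHead_nil_append]

-- ===== VERDICT (by name: the statement is the Claim_ definition above) =====
theorem to_xpath_literal_py_spec : Claim_equal_to_xpath_literal_py := by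
  intro value _
  unfold Spec_to_xpath_literal_py to_xpath_literal_py to_xpath_literal_py_alt
  simp only []
  rw [segments_eq value.toList]
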